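-- pv_equiv track=rewrite | github.com/almehj/project-euler | problem0043/sub_string.py | build_compat_table
-- ===== SOURCE A (Python) =====
-- def build_compat_table(segs):
--
--     answer = {}
--
--     for f in segs:
--         answer[f] = {}
--         for s in segs[f]:
--             k = s[1:]
--             v = s[0]
--             if k not in answer[f]:
--                 answer[f][k] = []
--             answer[f][k].append((v,s))
--
--     return answer
-- ===== SOURCE B (Python) =====
-- def build_compat_table(segs):
--     answer = {}
--     for f, lst in segs.items():
--         keys = list(dict.fromkeys(s[1:] for s in lst))
--         answer[f] = {k: [(s[0], s) for s in lst if s[1:] == k] for k in keys}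
--     return answer
-- ===== Notes on version B (the rewrite author's own statement) =====
-- stated objective: alternative
-- what changed: Replaces A's single-pass mutate-in-place bucketing (setdefault-style insert then append into answer[f][k]) by a two-phase decomposition: first collect the distinct suffix keys in first-occurrence order with dict.fromkeys, then build each bucket independently by filtering the segment list, assembling each inner dict in one comprehension with no mutation.
import Mathlib
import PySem

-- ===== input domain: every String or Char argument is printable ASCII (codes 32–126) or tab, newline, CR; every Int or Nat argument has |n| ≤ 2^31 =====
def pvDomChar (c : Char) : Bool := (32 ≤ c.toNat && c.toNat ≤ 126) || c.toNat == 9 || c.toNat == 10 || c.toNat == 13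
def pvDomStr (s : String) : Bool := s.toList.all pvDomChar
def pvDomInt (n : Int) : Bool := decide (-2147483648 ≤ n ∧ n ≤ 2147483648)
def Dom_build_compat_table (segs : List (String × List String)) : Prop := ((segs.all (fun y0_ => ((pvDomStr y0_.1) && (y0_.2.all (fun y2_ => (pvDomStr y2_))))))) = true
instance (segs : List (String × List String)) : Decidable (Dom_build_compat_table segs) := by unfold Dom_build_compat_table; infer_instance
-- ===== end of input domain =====

-- B replaces A's single-pass mutate-in-place bucketing by a two-phase build (distinct suffix
-- keys first, then each bucket by an independent filter); same value, no speed claim.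

-- ===== PORT A =====
-- one iteration of A's inner loop: k = s[1:]; v = s[0] (IndexError on "" → none, excluded by Pre_);
-- if k not in answer[f]: answer[f][k] = []; answer[f][k].append((v, s))
def pvStepA (d : PySem.Dict String (List (String × String))) (s : String) :
    PySem.Dict String (List (String × String)) :=
  let k := PySem.Str.slice s (some 1) none
  match PySem.Str.pyGet? s 0 with
  | none => d
  | some c =>
      let v := String.ofList [c]
      let d1 := if d.contains k then d else d.insert k []
      d1.modify k [] (fun l => l ++ [(v, s)])

-- 'for f in segs: … for s in segs[f]: …' — dict iteration = its items in insertion order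
def build_compat_table (segs : List (String × List String)) :
    List (String × List (String × List (String × String))) :=
  (segs.foldl
    (fun answer p => answer.insert p.1 ((p.2.foldl pvStepA PySem.Dict.empty).items))
    PySem.Dict.empty).items

-- ===== PORT B =====
-- s[0] as a one-character string ("" only where Python would raise, excluded by Pre_)
def pvHeadB (s : String) : String :=
  match PySem.Str.pyGet? s 0 with
  | some c => String.ofList [c]
  | none => ""

-- [(s[0], s) for s in lst if s[1:] == k]
def pvBucketB (lst : List String) (k : String) : List (String × String) :=
  (lst.filter (fun s => PySem.Str.slice s (some 1) none == k)).map (fun s => (pvHeadB s, s))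

-- keys = list(dict.fromkeys(s[1:] for s in lst)); then one (k, bucket k) pair per key
def pvInnerB (lst : List String) : List (String × List (String × String)) :=
  (PySem.List.dedup (lst.map (fun s => PySem.Str.slice s (some 1) none))).map
    (fun k => (k, pvBucketB lst k))

def build_compat_table_alt (segs : List (String × List String)) :
    List (String × List (String × List (String × String))) :=
  (segs.foldl (fun answer p => answer.insert p.1 (pvInnerB p.2)) PySem.Dict.empty).items

-- ===== PRECONDITION & SPEC =====
-- Pre_ excludes exactly the inputs on which A raises: a zero-length segment string s makes s[0] raise IndexError.
def Pre_build_compat_table (segs : List (String × List String)) : Prop :=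
  ∀ p ∈ segs, ∀ s ∈ p.2, s ≠ ""
instance (segs : List (String × List String)) : Decidable (Pre_build_compat_table segs) := by
  unfold Pre_build_compat_table; infer_instance

def pvWitness_build_compat_table : (List (String × List String)) :=
  [("012", ["abc", "xbc", "yz"]), ("34", [])]

def Spec_build_compat_table (segs : List (String × List String)) (out : List (String × List (String × List (String × String)))) : Prop := out = build_compat_table_alt segs
instance (segs : List (String × List String)) (out : List (String × List (String × List (String × String)))) : Decidable (Spec_build_compat_table segs out) := by unfold Spec_build_compat_table; infer_instance

-- ===== CLAIM (what is proved, stated in full; the proofs are below) =====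
def Claim_equal_build_compat_table : Prop := ∀ (segs : List (String × List String)), Dom_build_compat_table segs → Pre_build_compat_table segs → Spec_build_compat_table segs (build_compat_table segs)

-- ===== LEMMAS AND PROOFS =====

-- a nonempty string has a first character
lemma pvGet0_of_ne (s : String) (h : s ≠ "") : ∃ c, PySem.Str.pyGet? s 0 = some c := by
  have hl : s.toList ≠ [] := by
    intro hnil; apply h; simpa using congrArg String.ofList hnil
  cases hls : s.toList with
  | nil => exact absurd hls hl
  | cons c t =>
      refine ⟨c, ?_⟩
      simp [hls]

lemma pvStepA_keys (d : PySem.Dict String (List (String × String))) (s : String) (c : Char)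
    (h : PySem.Str.pyGet? s 0 = some c) :
    (pvStepA d s).keys = PySem.Set.add d.keys (PySem.Str.slice s (some 1) none) := by
  unfold pvStepA
  rw [h]
  dsimp only
  set k := PySem.Str.slice s (some 1) none with hk
  by_cases hc : d.contains k = true
  · rw [if_pos hc, PySem.Dict.keys_modify, PySem.Dict.keys_insert_of_contains _ _ hc,
      PySem.Set.add_eq_ite, if_pos ((PySem.Dict.contains_iff_mem_keys d k).mp hc)]
  · have hc' : d.contains k = false := by simpa using hc
    rw [if_neg hc, PySem.Dict.keys_modify]
    have hck : (d.insert k ([] : List (String × String))).contains k = true :=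
      PySem.Dict.contains_insert_self d k []
    rw [PySem.Dict.keys_insert_of_contains _ _ hck,
      PySem.Dict.keys_insert_of_not_contains d _ hc', PySem.Set.add_eq_ite,
      if_neg (fun hm => by simp [(PySem.Dict.contains_iff_mem_keys d k).mpr hm] at hc')]

lemma pvStepA_getD (d : PySem.Dict String (List (String × String))) (s : String) (c : Char)
    (h : PySem.Str.pyGet? s 0 = some c) (k' : String) :
    (pvStepA d s).getD k' [] =
      if k' = PySem.Str.slice s (some 1) none then
        d.getD (PySem.Str.slice s (some 1) none) [] ++ [(String.ofList [c], s)]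
      else d.getD k' [] := by
  unfold pvStepA
  rw [h]
  dsimp only
  set k := PySem.Str.slice s (some 1) none with hk
  by_cases hc : d.contains k = true
  · rw [if_pos hc, PySem.Dict.getD_modify]
  · have hc' : d.contains k = false := by simpa using hc
    rw [if_neg hc, PySem.Dict.getD_modify]
    by_cases hkk : k' = k
    · simp [hkk, PySem.Dict.getD_of_not_contains d ([] : List (String × String)) hc']
    · simp [hkk, PySem.Dict.getD_insert]

lemma pvInnerA_keys (lst : List String) (h : ∀ s ∈ lst, s ≠ "") :
    (lst.foldl pvStepA PySem.Dict.empty).keys =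
      PySem.Set.ofList (lst.map (fun s => PySem.Str.slice s (some 1) none)) := by
  induction lst using List.reverseRecOn with
  | nil => simp [PySem.Set.ofList]
  | append_singleton xs s ih =>
      have hs : s ≠ "" := h s (by simp)
      obtain ⟨c, hc⟩ := pvGet0_of_ne s hs
      rw [List.foldl_append, List.foldl_cons, List.foldl_nil,
        pvStepA_keys _ s c hc, ih (fun t ht => h t (by simp [ht])), List.map_append]
      simp only [PySem.Set.ofList_eq_foldl, List.foldl_append, List.foldl_cons, List.foldl_nil,
        List.map_cons, List.map_nil]

lemma pvInnerA_getD (lst : List String) (h : ∀ s ∈ lst, s ≠ "") (k : String) :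
    (lst.foldl pvStepA PySem.Dict.empty).getD k [] = pvBucketB lst k := by
  induction lst using List.reverseRecOn with
  | nil => simp [pvBucketB, PySem.Dict.getD_empty]
  | append_singleton xs s ih =>
      have hs : s ≠ "" := h s (by simp)
      obtain ⟨c, hc⟩ := pvGet0_of_ne s hs
      have hhead : pvHeadB s = String.ofList [c] := by
        have hc' : PySem.List.pyGet? s.toList 0 = some c := by simpa using hc
        simp [pvHeadB, hc']
      have ih' := ih (fun t ht => h t (by simp [ht]))
      rw [List.foldl_append, List.foldl_cons, List.foldl_nil, pvStepA_getD _ s c hc]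
      unfold pvBucketB
      rw [List.filter_append, List.map_append]
      by_cases hkk : k = PySem.Str.slice s (some 1) none
      · subst hkk
        rw [if_pos rfl]
        unfold pvBucketB at ih'
        rw [ih']
        simp [List.filter, hhead]
      · rw [if_neg hkk]
        unfold pvBucketB at ih'
        rw [ih']
        have hne : (PySem.Str.slice s (some 1) none == k) = false := by
          simp [Ne.symm hkk]
        simp [List.filter, hne]

lemma pvInner_eq (lst : List String) (h : ∀ s ∈ lst, s ≠ "") :
    (lst.foldl pvStepA PySem.Dict.empty).items = pvInnerB lst := by
  have hk := pvInnerA_keys lst h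
  have hnd : (lst.foldl pvStepA PySem.Dict.empty).keys.Nodup := by
    rw [hk]; exact PySem.Set.nodup_ofList _
  rw [PySem.Dict.items_eq_map_keys _ hnd ([] : List (String × String)), hk]
  unfold pvInnerB
  rw [PySem.List.dedup_eq_ofList]
  exact List.map_congr_left (fun k _ => by rw [pvInnerA_getD lst h k])

-- ===== VERDICT (by name: the statement is the Claim_ definition above) =====
theorem build_compat_table_spec : Claim_equal_build_compat_table := by
  intro segs _ hpre
  unfold Spec_build_compat_table build_compat_table build_compat_table_alt
  congr 1
  apply PySem.List.foldl_congr_mem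
  intro ans p hp
  rw [pvInner_eq p.2 (fun s hs => hpre p hp s hs)]
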